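-- pv_equiv track=rewrite | github.com/vishalsonawane77/CL3 | CLIII/A3/A3.py | max_min_composition
-- ===== SOURCE A (Python) =====
-- def max_min_composition(R, S):
--     composition = {}
--     X = set([key[0] for key in R.keys()])
--     Y = set([key[1] for key in R.keys()])
--     Z = set([key[1] for key in S.keys()])
--
--     for x in X:
--         for z in Z:
--             min_values = []
--             for y in Y:
--                 if (x, y) in R and (y, z) in S:
--                     min_values.append(min(R[(x, y)], S[(y, z)]))
--             if min_values:
--                 composition[(x, z)] = max(min_values)
--     return composition
-- ===== SOURCE B (Python) =====
-- def max_min_composition(R, S):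
--     # Group R's entries by their first coordinate, in first-occurrence order.
--     rows = {}
--     for (x, y), r in R.items():
--         rows.setdefault(x, []).append((y, r))
--     # Distinct second coordinates of S's keys, in first-occurrence order.
--     zs = list(dict.fromkeys(z for (_, z) in S.keys()))
--     composition = {}
--     for x, row in rows.items():
--         for z in zs:
--             best = None
--             for y, r in row:
--                 s = S.get((y, z))
--                 if s is not None:
--                     m = min(r, s)
--                     if best is None or best < m:
--                         best = m
--             if best is not None:
--                 composition[(x, z)] = best
--     return composition
-- ===== Notes on version B (the rewrite author's own statement) =====
-- stated objective: faster
-- what changed: Instead of scanning, for every (x,z) grid cell, ALL distinct middle coordinates y with two dict-membership tests, B groups R's entries by their first coordinate once and, per cell, runs a max-min over only the actual R-entries of that row, looking the (y,z) pair up in S directly.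
import Mathlib
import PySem

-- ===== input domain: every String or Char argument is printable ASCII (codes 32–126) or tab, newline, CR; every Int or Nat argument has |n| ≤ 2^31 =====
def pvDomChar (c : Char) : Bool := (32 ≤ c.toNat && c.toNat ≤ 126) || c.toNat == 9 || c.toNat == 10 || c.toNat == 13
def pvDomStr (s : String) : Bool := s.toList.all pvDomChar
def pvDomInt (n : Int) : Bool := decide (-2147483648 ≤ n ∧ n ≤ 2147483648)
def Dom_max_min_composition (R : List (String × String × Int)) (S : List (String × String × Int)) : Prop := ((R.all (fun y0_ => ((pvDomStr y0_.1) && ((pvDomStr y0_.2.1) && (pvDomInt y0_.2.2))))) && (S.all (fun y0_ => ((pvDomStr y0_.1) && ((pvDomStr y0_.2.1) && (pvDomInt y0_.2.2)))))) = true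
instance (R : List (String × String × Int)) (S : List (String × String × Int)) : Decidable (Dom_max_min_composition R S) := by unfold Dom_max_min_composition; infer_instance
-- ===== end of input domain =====

-- B groups R's entries by first coordinate once, so each (x,z) cell scans only that row's
-- actual entries with a direct S lookup instead of all distinct y with two membership tests (objective: faster).


-- shared input decoding: the Python arguments are dicts keyed by string pairs;
-- the triple list is turned into a PySem.Dict exactly as Python builds the dict (later duplicate wins).
def pvToDict (L : List (String × String × Int)) : PySem.Dict (String × String) Int :=
  L.foldl (fun d t => d.insert (t.1, t.2.1) t.2.2) PySem.Dict.empty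

-- shared output encoding: the returned dict {(x,z): v} as a triple list
def pvOfDict (d : PySem.Dict (String × String) Int) : List (String × String × Int) :=
  d.items.map (fun p => (p.1.1, p.1.2, p.2))

-- ===== PORT A =====
def max_min_composition (R : List (String × String × Int)) (S : List (String × String × Int)) : List (String × String × Int) :=
  let rd := pvToDict R
  let sd := pvToDict S
  let X : PySem.Set String := PySem.Set.ofList (rd.keys.map (fun k => k.1))
  let Y : PySem.Set String := PySem.Set.ofList (rd.keys.map (fun k => k.2))
  let Z : PySem.Set String := PySem.Set.ofList (sd.keys.map (fun k => k.2))
  let composition :=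
    X.foldl (fun composition x =>
      Z.foldl (fun composition z =>
        let min_values : List Int :=
          Y.foldl (fun acc y =>
            if rd.contains (x, y) && sd.contains (y, z) then
              acc ++ [min (rd.getD (x, y) 0) (sd.getD (y, z) 0)]
            else acc) []
        match PySem.List.max? min_values id with
        | some m => composition.insert (x, z) m
        | none => composition) composition) PySem.Dict.empty
  pvOfDict composition

-- ===== PORT B =====
def max_min_composition_alt (R : List (String × String × Int)) (S : List (String × String × Int)) : List (String × String × Int) :=
  let rd := pvToDict R
  let sd := pvToDict S
  -- rows: x -> list of (y, r), grouped in first-occurrence order (setdefault/append loop)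
  let rows : PySem.Dict String (List (String × Int)) :=
    (rd.items.map (fun p => (p.1.1, (p.1.2, p.2)))).foldl
      (fun d p => d.modify p.1 [] (fun l => l ++ [p.2])) PySem.Dict.empty
  let zs : List String := PySem.List.dedup (sd.keys.map (fun k => k.2))
  let composition :=
    rows.items.foldl (fun composition xrow =>
      zs.foldl (fun composition z =>
        let best : Option Int :=
          xrow.2.foldl (fun best yr =>
            match sd.get? (yr.1, z) with
            | some s =>
              let m := min yr.2 s
              match best with
              | none => some m
              | some b => if b < m then some m else some b
            | none => best) none
        match best with
        | some m => composition.insert (xrow.1, z) m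
        | none => composition) composition) PySem.Dict.empty
  pvOfDict composition

-- ===== PRECONDITION & SPEC =====
def Spec_max_min_composition (R : List (String × String × Int)) (S : List (String × String × Int)) (out : List (String × String × Int)) : Prop := out = max_min_composition_alt R S
instance (R : List (String × String × Int)) (S : List (String × String × Int)) (out : List (String × String × Int)) : Decidable (Spec_max_min_composition R S out) := by unfold Spec_max_min_composition; infer_instance

-- ===== CLAIM (what is proved, stated in full; the proofs are below) =====
def Claim_equal_max_min_composition : Prop := ∀ (R : List (String × String × Int)) (S : List (String × String × Int)), Dom_max_min_composition R S → Spec_max_min_composition R S (max_min_composition R S)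

-- ===== LEMMAS AND PROOFS =====

def pvRow (rd : PySem.Dict (String × String) Int) (x : String) : List (String × Int) :=
  (rd.items.filter (fun p => p.1.1 == x)).map (fun p => (p.1.2, p.2))

theorem pvBlist_eq (rd sd : PySem.Dict (String × String) Int) (hnd : rd.keys.Nodup) (x z : String) :
    ((pvRow rd x).filter (fun yr => sd.contains (yr.1, z))).map
        (fun yr => min yr.2 (sd.getD (yr.1, z) 0))
    = ((rd.items.filter (fun p => p.1.1 == x && sd.contains (p.1.2, z))).map (fun p => p.1.2)).map
        (fun y => min (rd.getD (x, y) 0) (sd.getD (y, z) 0)) := by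
  have hget : ∀ p ∈ rd.items, rd.getD p.1 0 = p.2 := by
    intro p hp
    rw [PySem.Dict.items_eq_map_keys rd hnd 0] at hp
    obtain ⟨k, _, rfl⟩ := List.mem_map.mp hp
    rfl
  unfold pvRow
  rw [List.filter_map, List.map_map, List.map_map, List.filter_filter]
  have hfil : (fun (a : (String × String) × Int) =>
      ((fun yr : String × Int => sd.contains (yr.1, z)) ∘ fun p : (String × String) × Int => (p.1.2, p.2)) a
        && (a.1.1 == x))
      = (fun p : (String × String) × Int => p.1.1 == x && sd.contains (p.1.2, z)) := by
    funext a; simp [Function.comp, Bool.and_comm]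
  rw [hfil]
  apply List.map_congr_left
  intro p hp
  have hm := List.mem_filter.mp hp
  have hx : p.1.1 = x := by
    have := hm.2
    simp only [Bool.and_eq_true, beq_iff_eq] at this
    exact this.1
  have : rd.getD p.1 0 = p.2 := hget p hm.1
  simp only [Function.comp]
  rw [← hx]
  have hp1 : (p.1.1, p.1.2) = p.1 := rfl
  rw [hp1, this]
theorem pvMax?_perm (l₁ l₂ : List Int) (h : l₁.Perm l₂) :
    PySem.List.max? l₁ id = PySem.List.max? l₂ id := by
  unfold PySem.List.max?
  refine h.foldl_eq' ?_ none
  intro x _ y _ b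
  rcases b with _ | m <;> simp only [id_eq]
  · split_ifs <;> simp <;> omega
  · by_cases h1 : m < x <;> by_cases h2 : m < y <;>
      simp only [h1, h2, if_pos, if_neg, not_false_iff] <;>
      split_ifs <;> simp <;> omega

theorem pvInner_eq (sd : PySem.Dict (String × String) Int) (z : String) (row : List (String × Int)) :
    row.foldl (fun best yr =>
      match sd.get? (yr.1, z) with
      | some s =>
        let m := min yr.2 s
        match best with
        | none => some m
        | some b => if b < m then some m else some b
      | none => best) none
    = PySem.List.max? ((row.filter (fun yr => sd.contains (yr.1, z))).map
        (fun yr => min yr.2 (sd.getD (yr.1, z) 0))) id := by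
  have key : ∀ (row : List (String × Int)) (b : Option Int),
      row.foldl (fun best yr =>
        match sd.get? (yr.1, z) with
        | some s =>
          let m := min yr.2 s
          match best with
          | none => some m
          | some b => if b < m then some m else some b
        | none => best) b
      = ((row.filter (fun yr => sd.contains (yr.1, z))).map
          (fun yr => min yr.2 (sd.getD (yr.1, z) 0))).foldl
          (fun acc x => match acc with
            | none => some x
            | some m => if id m < id x then some x else some m) b := by
    intro row
    induction row with
    | nil => intro b; rfl
    | cons yr t ih =>
      intro b
      cases h : sd.get? (yr.1, z) with
      | none =>
        have hc : sd.contains (yr.1, z) = false := by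
          simp [PySem.Dict.contains_eq_isSome_get?, h]
        simp only [List.foldl_cons, h, List.filter_cons, hc]
        exact ih b
      | some s =>
        have hc : sd.contains (yr.1, z) = true := by
          simp [PySem.Dict.contains_eq_isSome_get?, h]
        have hg : sd.getD (yr.1, z) 0 = s := by simp [PySem.Dict.getD, h]
        simp only [List.foldl_cons, h, List.filter_cons, hc, if_true, List.map_cons, hg, id_eq]
        rcases b with _ | m <;> exact ih _
  rw [key]
  unfold PySem.List.max?
  congr 1
  funext acc x
  rcases acc <;> simp

theorem pvPerm (rd sd : PySem.Dict (String × String) Int) (hnd : rd.keys.Nodup) (x z : String) :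
    ((rd.items.filter (fun p => p.1.1 == x && sd.contains (p.1.2, z))).map (fun p => p.1.2)).Perm
      ((PySem.Set.ofList (rd.keys.map (fun k => k.2))).filter
        (fun y => rd.contains (x, y) && sd.contains (y, z))) := by
  have hkeys : rd.keys = rd.items.map (fun p => p.1) := by simp only [PySem.Dict.keys]
  have hnd' : (rd.items.map (fun p => p.1)).Nodup := by rwa [hkeys] at hnd
  have hsub : ((rd.items.filter (fun p => p.1.1 == x && sd.contains (p.1.2, z))).map (fun p => p.1)).Sublist
      (rd.items.map (fun p => p.1)) := List.filter_sublist.map _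
  have hk : ((rd.items.filter (fun p => p.1.1 == x && sd.contains (p.1.2, z))).map (fun p => p.1)).Nodup :=
    hnd'.sublist hsub
  have hnodup1 : ((rd.items.filter (fun p => p.1.1 == x && sd.contains (p.1.2, z))).map (fun p => p.1.2)).Nodup := by
    have hmm : (rd.items.filter (fun p => p.1.1 == x && sd.contains (p.1.2, z))).map (fun p => p.1.2)
        = ((rd.items.filter (fun p => p.1.1 == x && sd.contains (p.1.2, z))).map (fun p => p.1)).map (fun k => k.2) := by
      rw [List.map_map]; rfl
    rw [hmm]
    refine List.Nodup.map_on ?_ hk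
    intro a ha b hb hab
    obtain ⟨p, hp, rfl⟩ := List.mem_map.mp ha
    obtain ⟨q, hq, rfl⟩ := List.mem_map.mp hb
    have hpx : p.1.1 = x := by
      have := (List.mem_filter.mp hp).2; simp only [Bool.and_eq_true, beq_iff_eq] at this; exact this.1
    have hqx : q.1.1 = x := by
      have := (List.mem_filter.mp hq).2; simp only [Bool.and_eq_true, beq_iff_eq] at this; exact this.1
    exact Prod.ext (hpx.trans hqx.symm) hab
  have hnodup2 : (((PySem.Set.ofList (rd.keys.map (fun k => k.2))) : List String).filter
      (fun y => rd.contains (x, y) && sd.contains (y, z))).Nodup :=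
    (PySem.Set.nodup_ofList _).filter _
  rw [List.perm_ext_iff_of_nodup hnodup1 hnodup2]
  intro y
  constructor
  · intro hy
    obtain ⟨p, hp, rfl⟩ := List.mem_map.mp hy
    have hf := List.mem_filter.mp hp
    have hcond := hf.2
    simp only [Bool.and_eq_true, beq_iff_eq] at hcond
    have hkmem : p.1 ∈ rd.keys := by rw [hkeys]; exact List.mem_map.mpr ⟨p, hf.1, rfl⟩
    refine List.mem_filter.mpr ⟨?_, ?_⟩
    · exact (PySem.Set.mem_ofList _ _).mpr (List.mem_map.mpr ⟨p.1, hkmem, rfl⟩)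
    · have hcont : rd.contains (x, p.1.2) = true := by
        refine (PySem.Dict.contains_iff_mem_keys rd _).mpr ?_
        have : (x, p.1.2) = p.1 := Prod.ext hcond.1.symm rfl
        rwa [this]
      simp [hcont, hcond.2]
  · intro hy
    have hf := List.mem_filter.mp hy
    have hcond := hf.2
    simp only [Bool.and_eq_true] at hcond
    have hkmem : (x, y) ∈ rd.keys := (PySem.Dict.contains_iff_mem_keys rd _).mp hcond.1
    rw [hkeys] at hkmem
    obtain ⟨p, hp, hpeq⟩ := List.mem_map.mp hkmem
    refine List.mem_map.mpr ⟨p, List.mem_filter.mpr ⟨hp, ?_⟩, ?_⟩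
    · have h1 : p.1.1 = x := by rw [hpeq]
      have h2 : p.1.2 = y := by rw [hpeq]
      simp [h1, h2, hcond.2]
    · rw [hpeq]

-- the cell value computed by A equals the cell value computed by B
theorem pvCell_eq (rd sd : PySem.Dict (String × String) Int) (hnd : rd.keys.Nodup)
    (x z : String) :
    PySem.List.max?
      ((PySem.Set.ofList (rd.keys.map (fun k => k.2))).foldl (fun acc y =>
        if rd.contains (x, y) && sd.contains (y, z) then
          acc ++ [min (rd.getD (x, y) 0) (sd.getD (y, z) 0)]
        else acc) []) id
    = (pvRow rd x).foldl (fun best yr =>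
        match sd.get? (yr.1, z) with
        | some s =>
          let m := min yr.2 s
          match best with
          | none => some m
          | some b => if b < m then some m else some b
        | none => best) none := by
  rw [pvInner_eq, pvBlist_eq rd sd hnd x z, PySem.List.foldl_append_if, List.nil_append]
  exact (pvMax?_perm _ _ ((pvPerm rd sd hnd x z).map _)).symm

-- the composition dicts computed by the two ports coincide
theorem pvDict_eq (rd sd : PySem.Dict (String × String) Int) (hnd : rd.keys.Nodup) :
    (PySem.Set.ofList (rd.keys.map (fun k => k.1))).foldl (fun composition x =>
      (PySem.Set.ofList (sd.keys.map (fun k => k.2))).foldl (fun composition z =>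
        match PySem.List.max?
          ((PySem.Set.ofList (rd.keys.map (fun k => k.2))).foldl (fun acc y =>
            if rd.contains (x, y) && sd.contains (y, z) then
              acc ++ [min (rd.getD (x, y) 0) (sd.getD (y, z) 0)]
            else acc) []) id with
        | some m => composition.insert (x, z) m
        | none => composition) composition) PySem.Dict.empty
    = ((rd.items.map (fun p => (p.1.1, (p.1.2, p.2)))).foldl
        (fun d p => d.modify p.1 [] (fun l => l ++ [p.2])) PySem.Dict.empty).items.foldl
        (fun composition xrow =>
          (PySem.List.dedup (sd.keys.map (fun k => k.2))).foldl (fun composition z =>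
            match xrow.2.foldl (fun best yr =>
              match sd.get? (yr.1, z) with
              | some s =>
                let m := min yr.2 s
                match best with
                | none => some m
                | some b => if b < m then some m else some b
              | none => best) none with
            | some m => composition.insert (xrow.1, z) m
            | none => composition) composition) PySem.Dict.empty := by
  have hrows_keys :
      ((rd.items.map (fun p => (p.1.1, (p.1.2, p.2)))).foldl
        (fun d p => d.modify p.1 [] (fun l => l ++ [p.2])) PySem.Dict.empty).keys
      = PySem.Set.ofList (rd.keys.map (fun k => k.1)) := by
    rw [PySem.Dict.keys_foldl_modify_key]
    simp only [List.map_map, PySem.Dict.keys]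
    rfl
  have hrows_nodup :
      ((rd.items.map (fun p => (p.1.1, (p.1.2, p.2)))).foldl
        (fun d p => d.modify p.1 [] (fun l => l ++ [p.2])) PySem.Dict.empty).keys.Nodup := by
    rw [hrows_keys]; exact PySem.Set.nodup_ofList _
  have hrows_getD : ∀ x : String,
      ((rd.items.map (fun p => (p.1.1, (p.1.2, p.2)))).foldl
        (fun d p => d.modify p.1 [] (fun l => l ++ [p.2])) PySem.Dict.empty).getD x []
      = pvRow rd x := by
    intro x
    rw [PySem.Dict.getD_foldl_modify_append]
    simp only [List.filter_map, List.map_map]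
    rfl
  rw [PySem.Dict.items_eq_map_keys _ hrows_nodup [], hrows_keys, List.foldl_map]
  refine PySem.List.foldl_congr_mem _ _ _ _ ?_
  intro comp x _
  refine PySem.List.foldl_congr_mem _ _ _ _ ?_
  intro comp' z _
  rw [hrows_getD x, pvCell_eq rd sd hnd x z]

theorem pvToDict_nodup (L : List (String × String × Int)) : (pvToDict L).keys.Nodup := by
  unfold pvToDict
  refine PySem.Dict.nodup_keys_foldl_insert_key L (fun t => (t.1, t.2.1)) (fun d t => t.2.2)
    PySem.Dict.empty ?_
  rw [PySem.Dict.keys_empty]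
  exact List.nodup_nil

-- ===== VERDICT (by name: the statement is the Claim_ definition above) =====
theorem max_min_composition_spec : Claim_equal_max_min_composition := by
  intro R S _
  unfold Spec_max_min_composition max_min_composition max_min_composition_alt
  exact congrArg pvOfDict (pvDict_eq (pvToDict R) (pvToDict S) (pvToDict_nodup R))
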